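-- pv_equiv track=rewrite | github.com/yasinhessnawi1/Hideme_Backend | backend/app/document_processing/detection_updater.py | _remove_phrase_from_text
-- ===== SOURCE A (Python) =====
-- from typing import Dict, Any, List, Tuple
--
-- def _remove_phrase_from_text(text: str, phrase_tokens: List[str]) -> List[str]:
--     """
--     Remove a given phrase (as tokens) from a single text according to specific rules.
--
--     The removal logic is as follows:
--       1) If the text exactly matches the phrase tokens, return an empty list.
--       2) If the text starts and ends with the phrase tokens, remove these boundary tokens.
--       3) Otherwise, if the phrase is found as a contiguous block in the text, split the text around that block.
--
--     Args:
--         text (str): The original text.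
--         phrase_tokens (List[str]): The tokens of the phrase to remove.
--
--     Returns:
--         List[str]: A list of resulting texts after removal, which may be empty if fully removed.
--     """
--     # Split the original text into tokens.
--     tokens = text.split()
--     # If the text has fewer tokens than the phrase, return the original text as a list.
--     if len(tokens) < len(phrase_tokens):
--         return [text]
--     # Check if the text exactly matches the phrase tokens.
--     if tokens == phrase_tokens:
--         return []
--     # If the text starts and ends with the phrase tokens, remove the first and last token.
--     if (tokens[0].lower() == phrase_tokens[0].lower() and
--             tokens[-1].lower() == phrase_tokens[-1].lower() and
--             len(tokens) >= len(phrase_tokens)):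
--         new_text = " ".join(tokens[1:-1])
--         return [new_text] if new_text else []
--     # Iterate through the tokens to find the phrase as a contiguous block.
--     for i in range(len(tokens) - len(phrase_tokens) + 1):
--         # Extract a block of tokens from the text.
--         block = tokens[i:i + len(phrase_tokens)]
--         # Compare the block tokens to the phrase tokens ignoring case.
--         if all(block[j].lower() == phrase_tokens[j].lower() for j in range(len(phrase_tokens))):
--             # Remove the block from the text by splitting into two parts.
--             part1 = tokens[:i]
--             part2 = tokens[i + len(phrase_tokens):]
--             results = []
--             # If part1 exists, join tokens and append to results.
--             if part1:
--                 results.append(" ".join(part1))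
--             # If part2 exists, join tokens and append to results.
--             if part2:
--                 results.append(" ".join(part2))
--             return results
--     # If no removal condition applies, return the original text as a list.
--     return [text]
-- ===== SOURCE B (Python) =====
-- from typing import List
--
-- def _remove_phrase_from_text(text: str, phrase_tokens: List[str]) -> List[str]:
--     tokens = text.split()
--     if len(tokens) < len(phrase_tokens):
--         return [text]
--     if tokens == phrase_tokens:
--         return []
--     low = [t.lower() for t in tokens]
--     pl = [t.lower() for t in phrase_tokens]
--     if low[0] == pl[0] and low[-1] == pl[-1]:
--         body = tokens[1:-1]
--         mid = " ".join(body)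
--         return [mid] if mid else []
--     # one pass over the suffixes with a prefix accumulator; lowercase computed once
--     pre: List[str] = []
--     rest = tokens
--     lrest = low
--     while lrest:
--         if lrest[: len(pl)] == pl:
--             tail = rest[len(pl):]
--             out = []
--             if pre:
--                 out.append(" ".join(pre))
--             if tail:
--                 out.append(" ".join(tail))
--             return out
--         pre.append(rest[0])
--         rest = rest[1:]
--         lrest = lrest[1:]
--     return [text]
-- ===== Notes on version B (the rewrite author's own statement) =====
-- stated objective: alternative
-- what changed: B lowercases all tokens once up front and finds the phrase by a single accumulator walk over the token-list suffixes comparing a precomputed lowercase prefix, instead of A's index loop that re-slices the token list and re-lowercases every block element inside a nested all().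
import Mathlib
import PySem

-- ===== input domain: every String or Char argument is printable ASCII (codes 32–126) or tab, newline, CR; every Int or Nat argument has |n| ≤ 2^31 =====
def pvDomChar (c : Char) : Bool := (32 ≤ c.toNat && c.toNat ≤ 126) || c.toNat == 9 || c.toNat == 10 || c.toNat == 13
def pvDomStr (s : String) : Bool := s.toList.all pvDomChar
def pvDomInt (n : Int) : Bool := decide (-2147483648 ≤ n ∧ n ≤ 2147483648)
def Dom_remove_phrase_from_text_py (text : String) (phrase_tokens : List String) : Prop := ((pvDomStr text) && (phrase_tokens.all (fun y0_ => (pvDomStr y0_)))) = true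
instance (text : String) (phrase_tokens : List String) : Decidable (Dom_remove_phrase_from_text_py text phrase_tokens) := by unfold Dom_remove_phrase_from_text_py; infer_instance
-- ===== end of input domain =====

-- B lowercases the tokens once and finds the phrase by a single accumulator walk over token-list
-- suffixes (precomputed-lowercase prefix comparison), instead of A's index loop with a nested
-- per-element lowercasing all(); objective: alternative structure, same asymptotic cost.


-- ===== PORT A =====
-- the 'for i in range(...)' loop with its early return, transliterated as recursion over the index list
def pvA_loop (text : String) (tokens phrase_tokens : List String) : List Int → List String
  | [] => [text]
  | i :: is =>
      let block := PySem.List.slice tokens (some i) (some (i + (phrase_tokens.length : Int)))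
      if (PySem.List.pyRange 0 (phrase_tokens.length : Int) 1).all (fun j =>
            PySem.Str.lower (PySem.List.pyGetD block j "") == PySem.Str.lower (PySem.List.pyGetD phrase_tokens j "")) then
        let part1 := PySem.List.slice tokens none (some i)
        let part2 := PySem.List.slice tokens (some (i + (phrase_tokens.length : Int))) none
        let results : List String := []
        let results := if part1 ≠ [] then results ++ [PySem.Str.join " " part1] else results
        let results := if part2 ≠ [] then results ++ [PySem.Str.join " " part2] else results
        results
      else pvA_loop text tokens phrase_tokens is

def remove_phrase_from_text_py (text : String) (phrase_tokens : List String) : List String :=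
  let tokens := PySem.Str.split₀ text
  if tokens.length < phrase_tokens.length then [text]
  else if tokens = phrase_tokens then []
  else if PySem.Str.lower (PySem.List.pyGetD tokens 0 "") == PySem.Str.lower (PySem.List.pyGetD phrase_tokens 0 "")
        && PySem.Str.lower (PySem.List.pyGetD tokens (-1) "") == PySem.Str.lower (PySem.List.pyGetD phrase_tokens (-1) "")
        && decide (phrase_tokens.length ≤ tokens.length) then
    let new_text := PySem.Str.join " " (PySem.List.slice tokens (some 1) (some (-1)))
    if new_text ≠ "" then [new_text] else []
  else
    pvA_loop text tokens phrase_tokens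
      (PySem.List.pyRange 0 ((tokens.length : Int) - (phrase_tokens.length : Int) + 1) 1)

-- ===== PORT B =====
-- the 'while lrest:' accumulator walk of Source B, transliterated as recursion on the lowercase suffix
def pvB_loop (text : String) (pl : List String) (pre rest : List String) : List String → List String
  | [] => [text]
  | l :: ltail =>
      if PySem.List.slice (l :: ltail) none (some (pl.length : Int)) == pl then
        let tail := PySem.List.slice rest (some (pl.length : Int)) none
        let out : List String := []
        let out := if pre ≠ [] then out ++ [PySem.Str.join " " pre] else out
        let out := if tail ≠ [] then out ++ [PySem.Str.join " " tail] else out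
        out
      else
        pvB_loop text pl (pre ++ [PySem.List.pyGetD rest 0 ""]) (PySem.List.slice rest (some 1) none) ltail

def remove_phrase_from_text_py_alt (text : String) (phrase_tokens : List String) : List String :=
  let tokens := PySem.Str.split₀ text
  if tokens.length < phrase_tokens.length then [text]
  else if tokens = phrase_tokens then []
  else
    let low := tokens.map PySem.Str.lower
    let pl := phrase_tokens.map PySem.Str.lower
    if PySem.List.pyGetD low 0 "" == PySem.List.pyGetD pl 0 ""
        && PySem.List.pyGetD low (-1) "" == PySem.List.pyGetD pl (-1) "" then
      let mid := PySem.Str.join " " (PySem.List.slice tokens (some 1) (some (-1)))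
      if mid ≠ "" then [mid] else []
    else
      pvB_loop text pl [] tokens low

-- ===== PRECONDITION & SPEC =====
-- Pre_ excludes exactly the inputs where the Python raises IndexError: an empty phrase with a
-- non-empty tokenisation of the text (phrase_tokens[0] is indexed after the equality checks fail).
def Pre_remove_phrase_from_text_py (text : String) (phrase_tokens : List String) : Prop :=
  phrase_tokens ≠ [] ∨ PySem.Str.split₀ text = []
instance (text : String) (phrase_tokens : List String) : Decidable (Pre_remove_phrase_from_text_py text phrase_tokens) := by unfold Pre_remove_phrase_from_text_py; infer_instance

def pvWitness_remove_phrase_from_text_py : String × List String := ("the Secret code word", ["secret", "Code"])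

def Spec_remove_phrase_from_text_py (text : String) (phrase_tokens : List String) (out : List String) : Prop := out = remove_phrase_from_text_py_alt text phrase_tokens
instance (text : String) (phrase_tokens : List String) (out : List String) : Decidable (Spec_remove_phrase_from_text_py text phrase_tokens out) := by unfold Spec_remove_phrase_from_text_py; infer_instance

-- ===== CLAIM (what is proved, stated in full; the proofs are below) =====
def Claim_equal_remove_phrase_from_text_py : Prop := ∀ (text : String) (phrase_tokens : List String), Dom_remove_phrase_from_text_py text phrase_tokens → Pre_remove_phrase_from_text_py text phrase_tokens → Spec_remove_phrase_from_text_py text phrase_tokens (remove_phrase_from_text_py text phrase_tokens)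

-- ===== LEMMAS AND PROOFS =====

theorem pvGetD_zero_map (f : String → String) (xs : List String) (hx : xs ≠ []) :
    PySem.List.pyGetD (xs.map f) 0 "" = f (PySem.List.pyGetD xs 0 "") := by
  cases xs with
  | nil => simp at hx
  | cons a l => simp [PySem.List.pyGetD_zero_cons, List.map]

theorem pvGetD_neg_one_map (f : String → String) (xs : List String) (hx : xs ≠ []) :
    PySem.List.pyGetD (xs.map f) (-1) "" = f (PySem.List.pyGetD xs (-1) "") := by
  rcases List.eq_nil_or_concat xs with rfl | ⟨ys, y, rfl⟩
  · simp at hx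
  · simp [List.map_append, PySem.List.pyGetD_neg_one_append_singleton]

theorem pvCond_eq (tokens phrase : List String) (k : Nat) (h : k + phrase.length ≤ tokens.length) :
    ((PySem.List.pyRange 0 (phrase.length : Int) 1).all (fun j =>
        PySem.Str.lower (PySem.List.pyGetD
          (PySem.List.slice tokens (some (k : Int)) (some ((k : Int) + (phrase.length : Int)))) j "")
        == PySem.Str.lower (PySem.List.pyGetD phrase j "")))
    = (((tokens.map PySem.Str.lower).drop k).take phrase.length == phrase.map PySem.Str.lower) := by
  rw [PySem.List.slice_natCast_add tokens k phrase.length]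
  set m := phrase.length with hm
  set block := (tokens.drop k).take m with hb
  have hbl : block.length = m := by
    simp [hb, List.length_take, List.length_drop]; omega
  rw [Bool.eq_iff_iff]
  rw [PySem.List.pyRange_zero_nat m, List.all_map]
  rw [← List.map_drop, ← List.map_take, ← hb]
  simp only [List.all_eq_true, List.mem_range, Function.comp, beq_iff_eq,
    PySem.List.pyGetD_natCast]
  constructor
  · intro hall
    apply List.ext_getElem
    · simp [hbl]; exact hm
    · intro i h1 h2
      have hi : i < m := by simpa [hbl] using h1
      have := hall i hi
      simp only [List.getD_eq_getElem?_getD] at this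
      have hip : i < phrase.length := by omega
      have hib : i < block.length := by omega
      simpa [List.getElem?_eq_getElem, hib, hip, List.getElem_map] using this
  · intro heq j hj
    have h1 : j < block.length := by omega
    have h2 : j < phrase.length := by omega
    have := congrArg (fun l => l[j]?) heq
    simp only [List.getElem?_map, List.getElem?_eq_getElem, h1, h2, Option.map_some] at this
    simp only [List.getD_eq_getElem?_getD, List.getElem?_eq_getElem, h1, h2, Option.getD_some]
    exact Option.some.inj this

theorem pvScan_eq (text : String) (tokens phrase : List String) (hm : phrase ≠ []) :
    ∀ k : Nat, k ≤ tokens.length →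
    pvA_loop text tokens phrase
      (PySem.List.pyRange (k : Int) ((tokens.length : Int) - (phrase.length : Int) + 1) 1)
    = pvB_loop text (phrase.map PySem.Str.lower) (tokens.take k) (tokens.drop k)
        ((tokens.map PySem.Str.lower).drop k) := by
  intro k hk
  have hm1 : 1 ≤ phrase.length := List.length_pos_of_ne_nil hm
  induction hd : tokens.length - k generalizing k with
  | zero =>
    have hkn : k = tokens.length := by omega
    subst hkn
    rw [List.drop_length, PySem.List.pyRange_one_eq_nil (by omega)]
    have : (tokens.map PySem.Str.lower).drop tokens.length = [] := by
      simp
    rw [this]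
    simp [pvA_loop, pvB_loop]
  | succ d ih =>
    have hkn : k < tokens.length := by omega
    obtain ⟨t, ts, hts⟩ : ∃ t ts, tokens.drop k = t :: ts := by
      cases h : tokens.drop k with
      | nil => exfalso; have := List.length_drop (l := tokens) (i := k); rw [h] at this; simp at this; omega
      | cons a l => exact ⟨a, l, rfl⟩
    have hlow : (tokens.map PySem.Str.lower).drop k = PySem.Str.lower t :: ts.map PySem.Str.lower := by
      rw [← List.map_drop, hts, List.map_cons]
    have htake1 : tokens.take (k+1) = tokens.take k ++ [t] := by
      rw [List.take_add, hts]; simp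
    have hdrop1 : tokens.drop (k+1) = ts := by
      have : tokens.drop (k+1) = (tokens.drop k).tail := by
        rw [← List.drop_drop]; simp
      rw [this, hts]; rfl
    have hlow1 : (tokens.map PySem.Str.lower).drop (k+1) = ts.map PySem.Str.lower := by
      rw [← List.map_drop, hdrop1]
    have hBstep : pvB_loop text (phrase.map PySem.Str.lower) (tokens.take k) (tokens.drop k)
        ((tokens.map PySem.Str.lower).drop k)
      = if (PySem.List.slice (PySem.Str.lower t :: ts.map PySem.Str.lower) none
              (some ((phrase.map PySem.Str.lower).length : Int)) == phrase.map PySem.Str.lower) then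
          (let tail := PySem.List.slice (tokens.drop k) (some ((phrase.map PySem.Str.lower).length : Int)) none
           let out : List String := []
           let out := if tokens.take k ≠ [] then out ++ [PySem.Str.join " " (tokens.take k)] else out
           let out := if tail ≠ [] then out ++ [PySem.Str.join " " tail] else out
           out)
        else pvB_loop text (phrase.map PySem.Str.lower)
              (tokens.take k ++ [PySem.List.pyGetD (tokens.drop k) 0 ""])
              (PySem.List.slice (tokens.drop k) (some 1) none)
              (ts.map PySem.Str.lower) := by
      rw [hlow]; rfl
    by_cases hfit : k + phrase.length ≤ tokens.length
    · -- A's range is nonempty at k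
      rw [PySem.List.pyRange_one_cons (by omega)]
      show pvA_loop text tokens phrase (_ :: _) = _
      rw [pvA_loop]
      simp only []
      rw [pvCond_eq tokens phrase k hfit]
      rw [hBstep]
      have hcondB : (((tokens.map PySem.Str.lower).drop k).take phrase.length == phrase.map PySem.Str.lower)
          = (PySem.List.slice (PySem.Str.lower t :: ts.map PySem.Str.lower) none
              (some ((phrase.map PySem.Str.lower).length : Int)) == phrase.map PySem.Str.lower) := by
        rw [PySem.List.slice_to_natCast, List.length_map, hlow]
      rw [← hcondB]
      by_cases hc : (((tokens.map PySem.Str.lower).drop k).take phrase.length == phrase.map PySem.Str.lower) = true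
      · rw [if_pos hc, if_pos hc]
        have hp1 : PySem.List.slice tokens none (some (k : Int)) = tokens.take k :=
          PySem.List.slice_to_natCast tokens k
        have hp2 : PySem.List.slice tokens (some ((k : Int) + (phrase.length : Int))) none
            = tokens.drop (k + phrase.length) := by
          rw [show ((k : Int) + (phrase.length : Int)) = ((k + phrase.length : Nat) : Int) by push_cast; ring]
          exact PySem.List.slice_from_natCast tokens (k + phrase.length)
        have hp3 : PySem.List.slice (tokens.drop k) (some ((phrase.map PySem.Str.lower).length : Int)) none
            = tokens.drop (k + phrase.length) := by
          rw [List.length_map, PySem.List.slice_from_natCast, List.drop_drop]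
        simp only [hp1, hp2, hp3]
      · rw [if_neg hc, if_neg hc]
        rw [hts] at *
        rw [PySem.List.pyGetD_zero_cons, PySem.List.slice_from_one]
        show pvA_loop text tokens phrase
            (PySem.List.pyRange ((k : Int) + 1) ((tokens.length : Int) - (phrase.length : Int) + 1) 1) = _
        rw [show ((k : Int) + 1) = (((k + 1 : Nat)) : Int) by push_cast; ring]
        rw [ih (k+1) (by omega) (by omega)]
        rw [htake1, hdrop1, hlow1]
        rfl
    · -- A's range is empty at k; B's prefix test fails on length grounds
      rw [PySem.List.pyRange_one_eq_nil (by omega)]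
      rw [hBstep]
      have hcfalse : (PySem.List.slice (PySem.Str.lower t :: ts.map PySem.Str.lower) none
          (some ((phrase.map PySem.Str.lower).length : Int)) == phrase.map PySem.Str.lower) = false := by
        rw [PySem.List.slice_to_natCast, List.length_map]
        apply beq_eq_false_iff_ne.mpr
        intro hcontr
        have hlen := congrArg List.length hcontr
        have hl1 : (PySem.Str.lower t :: ts.map PySem.Str.lower).length = tokens.length - k := by
          rw [← hlow, List.length_drop, List.length_map]
        simp only [List.length_take, List.length_map, hl1] at hlen
        omega
      rw [hcfalse]
      simp only [Bool.false_eq_true, if_false]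
      rw [hts] at *
      rw [PySem.List.pyGetD_zero_cons, PySem.List.slice_from_one]
      show [text] = pvB_loop text (phrase.map PySem.Str.lower) (tokens.take k ++ [t]) ts (ts.map PySem.Str.lower)
      rw [← hlow1, ← hdrop1, ← htake1, ← ih (k+1) (by omega) (by omega)]
      rw [PySem.List.pyRange_one_eq_nil (by omega)]
      rfl

theorem main_eq : ∀ (text : String) (phrase_tokens : List String),
    (phrase_tokens ≠ [] ∨ PySem.Str.split₀ text = []) →
    remove_phrase_from_text_py text phrase_tokens = remove_phrase_from_text_py_alt text phrase_tokens := by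
  intro text phrase hpre
  unfold remove_phrase_from_text_py remove_phrase_from_text_py_alt
  set ts := PySem.Str.split₀ text with hts
  by_cases h1 : ts.length < phrase.length
  · simp [h1]
  · rw [if_neg h1, if_neg h1]
    by_cases h2 : ts = phrase
    · simp [h2]
    · rw [if_neg h2, if_neg h2]
      have hp : phrase ≠ [] := by
        rcases hpre with h | h
        · exact h
        · intro hc; exact h2 (by rw [h, hc])
      have hp1 : 1 ≤ phrase.length := List.length_pos_of_ne_nil hp
      have ht : ts ≠ [] := by
        intro hc
        rw [hc] at h1; simp at h1
        exact hp h1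
      have e1 : PySem.List.pyGetD (ts.map PySem.Str.lower) 0 ""
          = PySem.Str.lower (PySem.List.pyGetD ts 0 "") := pvGetD_zero_map _ _ ht
      have e2 : PySem.List.pyGetD (phrase.map PySem.Str.lower) 0 ""
          = PySem.Str.lower (PySem.List.pyGetD phrase 0 "") := pvGetD_zero_map _ _ hp
      have e3 : PySem.List.pyGetD (ts.map PySem.Str.lower) (-1) ""
          = PySem.Str.lower (PySem.List.pyGetD ts (-1) "") := pvGetD_neg_one_map _ _ ht
      have e4 : PySem.List.pyGetD (phrase.map PySem.Str.lower) (-1) ""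
          = PySem.Str.lower (PySem.List.pyGetD phrase (-1) "") := pvGetD_neg_one_map _ _ hp
      simp only [e1, e2, e3, e4]
      have hle : phrase.length ≤ ts.length := by omega
      simp only [hle, decide_true, Bool.and_true]
      by_cases hc : (PySem.Str.lower (PySem.List.pyGetD ts 0 "") == PySem.Str.lower (PySem.List.pyGetD phrase 0 "")
          && PySem.Str.lower (PySem.List.pyGetD ts (-1) "") == PySem.Str.lower (PySem.List.pyGetD phrase (-1) "")) = true
      · rw [if_pos hc, if_pos hc]
      · rw [if_neg hc, if_neg hc]
        have := pvScan_eq text ts phrase hp 0 (Nat.zero_le _)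
        simpa using this

-- ===== VERDICT (by name: the statement is the Claim_ definition above) =====
theorem remove_phrase_from_text_py_spec : Claim_equal_remove_phrase_from_text_py := by
  intro text phrase_tokens _ hpre
  exact main_eq text phrase_tokens hpre
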